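-- pv_equiv track=rewrite | github.com/mj1618/desktop-assist-py | desktop_assist/screen.py | grid_to_coords
-- ===== SOURCE A (Python) =====
-- def grid_to_coords(
--     label: str,
--     grid_spacing: int = 100,
-- ) -> tuple[int, int]:
--     """Convert a grid cell label like ``"C5"`` to pixel coordinates.
--
--     Columns are letters (A=0, B=1, …) and rows are numbers (1=0, 2=1, …).
--     Returns the center of the cell so clicks land in the middle.
--
--     Raises ``ValueError`` for invalid labels.
--     """
--     label = label.strip().upper()
--     if len(label) < 2:
--         raise ValueError(f"Invalid grid label: {label!r}")
--
--     # Split into letter prefix and numeric suffix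
--     letters = ""
--     digits = ""
--     for ch in label:
--         if ch.isalpha():
--             if digits:
--                 raise ValueError(f"Invalid grid label: {label!r}")
--             letters += ch
--         elif ch.isdigit():
--             digits += ch
--         else:
--             raise ValueError(f"Invalid grid label: {label!r}")
--
--     if not letters or not digits:
--         raise ValueError(f"Invalid grid label: {label!r}")
--
--     # Convert column letters to index (A=0, B=1, ..., Z=25, AA=26, ...)
--     # Uses bijective base-26: each letter represents 1-26, not 0-25.
--     col = 0
--     for ch in letters:
--         col = col * 26 + (ord(ch) - ord("A") + 1)
--     col -= 1  # shift to 0-based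
--
--     row = int(digits) - 1
--     if row < 0:
--         raise ValueError(f"Invalid grid label: {label!r} (row must be >= 1)")
--
--     x = col * grid_spacing + grid_spacing // 2
--     y = row * grid_spacing + grid_spacing // 2
--     return (x, y)
-- ===== SOURCE B (Python) =====
-- def grid_to_coords(
--     label: str,
--     grid_spacing: int = 100,
-- ) -> tuple[int, int]:
--     """Split-then-validate rewrite: slice off the alphabetic prefix, validate in
--     bulk with str.isdigit, and compute the column as a positional power sum."""
--     s = label.strip().upper()
--
--     # split point: length of the alphabetic prefix
--     i = len(s)
--     for k, ch in enumerate(s):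
--         if not ch.isalpha():
--             i = k
--             break
--     letters, rest = s[:i], s[i:]
--
--     if not letters or not rest.isdigit():
--         raise ValueError(f"Invalid grid label: {s!r}")
--
--     row = int(rest) - 1
--     if row < 0:
--         raise ValueError(f"Invalid grid label: {s!r} (row must be >= 1)")
--
--     # bijective base-26 as an explicit power sum (A=1 ... Z=26), 0-based
--     col = sum((ord(ch) - 64) * 26 ** e for e, ch in enumerate(reversed(letters))) - 1
--
--     half = grid_spacing // 2
--     return (col * grid_spacing + half, row * grid_spacing + half)
-- ===== Notes on version B (the rewrite author's own statement) =====
-- stated objective: simpler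
-- what changed: Replaces A's stateful per-character letters/digits classification loop (with its order checks and length guard) by computing the alpha-prefix split point once, slicing, and validating in bulk with str.isdigit; the column is a positional power sum over enumerate(reversed(letters)) instead of Horner accumulation.
import Mathlib
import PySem

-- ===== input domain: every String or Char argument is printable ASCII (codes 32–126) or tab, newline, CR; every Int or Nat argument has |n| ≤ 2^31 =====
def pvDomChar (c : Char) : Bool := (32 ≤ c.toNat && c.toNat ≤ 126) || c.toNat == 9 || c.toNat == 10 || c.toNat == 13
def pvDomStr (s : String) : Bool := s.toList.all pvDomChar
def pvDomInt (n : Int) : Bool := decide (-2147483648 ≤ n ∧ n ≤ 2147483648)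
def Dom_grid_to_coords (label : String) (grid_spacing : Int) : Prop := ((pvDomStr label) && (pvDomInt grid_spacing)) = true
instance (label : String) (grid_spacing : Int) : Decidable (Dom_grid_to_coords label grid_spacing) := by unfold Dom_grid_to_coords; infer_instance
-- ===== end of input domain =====

-- B replaces A's stateful per-character classification with split-at-the-alpha-prefix
-- then bulk validation (str.isdigit) and a positional power sum for the column (objective: simpler).


-- ===== PORT A =====
-- A's classification loop: state (letters, digits); none = the ValueError paths.
def pvAClassify : List Char → List Char → List Char → Option (List Char × List Char)
  | [], letters, digits => some (letters, digits)
  | c :: cs, letters, digits =>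
    if PySem.Chars.isalpha c then
      if digits ≠ [] then none else pvAClassify cs (letters ++ [c]) digits
    else if PySem.Chars.isdigit c then pvAClassify cs letters (digits ++ [c])
    else none

-- literal port of A; on every path where A raises ValueError it yields the (unclaimed) default (0, 0)
def grid_to_coords (label : String) (grid_spacing : Int) : Int × Int :=
  let s := PySem.Str.upper (PySem.Str.strip label)
  if PySem.Str.len s < 2 then (0, 0)
  else
    match pvAClassify s.toList [] [] with
    | none => (0, 0)
    | some (letters, digits) =>
      if letters = [] ∨ digits = [] then (0, 0)
      else
        let col := (letters.foldl (fun c ch => c * 26 + ((ch.toNat : Int) - 65 + 1)) 0) - 1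
        match PySem.Int.ofStr? (String.mk digits) with
        | none => (0, 0)
        | some n =>
          let row := n - 1
          if row < 0 then (0, 0)
          else (col * grid_spacing + PySem.Int.floordiv grid_spacing 2,
                row * grid_spacing + PySem.Int.floordiv grid_spacing 2)

-- ===== PORT B =====
-- B's split-point scan: first index whose char is not alphabetic (len s if none)
def pvBSplit : List Char → Nat
  | [] => 0
  | c :: cs => if PySem.Chars.isalpha c then pvBSplit cs + 1 else 0

def grid_to_coords_alt (label : String) (grid_spacing : Int) : Int × Int :=
  let s := PySem.Str.upper (PySem.Str.strip label)
  let cs := s.toList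
  let i := pvBSplit cs
  let letters := cs.take i        -- s[:i], i a nonnegative in-range index, so take/drop are exact
  let rest := cs.drop i           -- s[i:]
  if letters = [] ∨ ¬ (PySem.Chars.strIsdigit rest) then (0, 0)
  else
    match PySem.Int.ofStr? (String.mk rest) with
    | none => (0, 0)
    | some n =>
      let row := n - 1
      if row < 0 then (0, 0)
      else
        -- enumerate(reversed(letters)); e ≥ 0 so 26 ** e is 26 ^ e.toNat exactly
        let col := ((PySem.List.enumerate letters.reverse 0).foldl
          (fun a p => a + ((p.2.toNat : Int) - 64) * 26 ^ p.1.toNat) 0) - 1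
        let half := PySem.Int.floordiv grid_spacing 2
        (col * grid_spacing + half, row * grid_spacing + half)

-- ===== PRECONDITION & SPEC =====
-- Pre_ = exactly the labels A accepts: after strip+upper, a nonempty alphabetic prefix
-- followed by a nonempty all-digit suffix that is not all zeros (row ≥ 1).
def Pre_grid_to_coords (label : String) (grid_spacing : Int) : Prop :=
  let cs := (PySem.Str.upper (PySem.Str.strip label)).toList
  let letters := cs.takeWhile PySem.Chars.isalpha
  let rest := cs.dropWhile PySem.Chars.isalpha
  letters ≠ [] ∧ rest ≠ [] ∧ rest.all PySem.Chars.isdigit = true ∧ rest.any (· ≠ '0') = true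
instance (label : String) (grid_spacing : Int) : Decidable (Pre_grid_to_coords label grid_spacing) := by unfold Pre_grid_to_coords; infer_instance

def pvWitness_grid_to_coords : String × Int := ("C5", 100)

def Spec_grid_to_coords (label : String) (grid_spacing : Int) (out : Int × Int) : Prop := out = grid_to_coords_alt label grid_spacing
instance (label : String) (grid_spacing : Int) (out : Int × Int) : Decidable (Spec_grid_to_coords label grid_spacing out) := by unfold Spec_grid_to_coords; infer_instance

-- ===== CLAIM (what is proved, stated in full; the proofs are below) =====
def Claim_equal_grid_to_coords : Prop := ∀ (label : String) (grid_spacing : Int), Dom_grid_to_coords label grid_spacing → Pre_grid_to_coords label grid_spacing → Spec_grid_to_coords label grid_spacing (grid_to_coords label grid_spacing)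

-- ===== LEMMAS AND PROOFS =====

lemma pv_not_alpha_of_digit {c : Char} (h : PySem.Chars.isdigit c = true) :
    PySem.Chars.isalpha c = false := by
  simp [PySem.Chars.isdigit] at h
  simp [PySem.Chars.isalpha, PySem.Chars.isupper, PySem.Chars.islower]
  constructor <;> intro hc <;>
    [exact absurd (le_trans hc h.2) (by decide); exact absurd (le_trans hc h.2) (by decide)]

-- A's loop walks the all-alpha prefix appending to letters
lemma pvAClassify_alpha (ls : List Char) (h : ls.all PySem.Chars.isalpha = true) :
    ∀ (cs L : List Char), pvAClassify (ls ++ cs) L [] = pvAClassify cs (L ++ ls) [] := by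
  induction ls with
  | nil => intro cs L; simp
  | cons c t ih =>
    intro cs L
    simp only [List.all_cons, Bool.and_eq_true] at h
    simp only [List.cons_append, pvAClassify, h.1, if_true]
    rw [if_neg (by simp), ih h.2]
    simp

-- A's loop walks an all-digit tail appending to digits
lemma pvAClassify_digit (ds : List Char) (h : ds.all PySem.Chars.isdigit = true) :
    ∀ (L D : List Char), pvAClassify ds L D = some (L, D ++ ds) := by
  induction ds with
  | nil => intro L D; simp [pvAClassify]
  | cons c t ih =>
    intro L D
    simp only [List.all_cons, Bool.and_eq_true] at h
    simp only [pvAClassify, pv_not_alpha_of_digit h.1, h.1, if_true, Bool.false_eq_true, if_false]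
    rw [ih h.2]
    simp

-- B's split point is the length of the alphabetic takeWhile prefix
lemma pvBSplit_eq (cs : List Char) :
    pvBSplit cs = (cs.takeWhile PySem.Chars.isalpha).length := by
  induction cs with
  | nil => rfl
  | cons c t ih =>
    by_cases h : PySem.Chars.isalpha c = true
    · simp [pvBSplit, h, ih]
    · simp [pvBSplit, h]

-- take/drop at the takeWhile split point
lemma pv_take_split (p : Char → Bool) (l : List Char) :
    l.take (l.takeWhile p).length = l.takeWhile p := by
  induction l with
  | nil => rfl
  | cons c t ih => by_cases h : p c <;> simp [h, ih]

lemma pv_drop_split (p : Char → Bool) (l : List Char) :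
    l.drop (l.takeWhile p).length = l.dropWhile p := by
  induction l with
  | nil => rfl
  | cons c t ih => by_cases h : p c <;> simp [h, ih]

-- Horner accumulation = positional power sum over enumerate(reversed ls)
lemma pv_horner (ls : List Char) : ∀ (acc : Int),
    ls.foldl (fun c ch => c * 26 + ((ch.toNat : Int) - 65 + 1)) acc
      = acc * 26 ^ ls.length +
        (PySem.List.enumerate ls.reverse 0).foldl
          (fun a p => a + ((p.2.toNat : Int) - 64) * 26 ^ p.1.toNat) 0 := by
  induction ls with
  | nil => intro acc; simp
  | cons c t ih =>
    intro acc
    rw [List.foldl_cons, ih, List.reverse_cons, List.length_cons,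
        PySem.List.enumerate_append, List.foldl_append,
        PySem.List.foldl_add, PySem.List.foldl_add]
    simp only [PySem.List.enumerate, List.map_cons, List.map_nil, List.sum_cons, List.sum_nil,
      List.length_reverse]
    have hx : ((0 : Int) + (t.length : Int)).toNat = t.length := by omega
    rw [hx, pow_succ]
    ring

-- combined parse lemma: under Pre_'s shape, A's classifier returns the takeWhile split
lemma pvAClassify_spec (cs : List Char)
    (hd : (cs.dropWhile PySem.Chars.isalpha).all PySem.Chars.isdigit = true) :
    pvAClassify cs [] [] =
      some (cs.takeWhile PySem.Chars.isalpha, cs.dropWhile PySem.Chars.isalpha) := by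
  conv_lhs => rw [← List.takeWhile_append_dropWhile (p := PySem.Chars.isalpha) (l := cs)]
  rw [pvAClassify_alpha _ (List.all_eq_true.2 (fun c hc => List.mem_takeWhile_imp hc)),
      pvAClassify_digit _ hd]
  simp

-- ===== VERDICT (by name: the statement is the Claim_ definition above) =====
theorem grid_to_coords_spec : Claim_equal_grid_to_coords := by
  intro label grid_spacing _ hpre
  obtain ⟨hl, hr, hd, _⟩ := hpre
  unfold Spec_grid_to_coords grid_to_coords grid_to_coords_alt
  simp only []
  generalize (PySem.Str.upper (PySem.Str.strip label)) = s at *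
  have hsplit : pvBSplit s.toList = (s.toList.takeWhile PySem.Chars.isalpha).length :=
    pvBSplit_eq s.toList
  have htake : s.toList.take (pvBSplit s.toList) = s.toList.takeWhile PySem.Chars.isalpha := by
    rw [hsplit]; exact pv_take_split _ _
  have hdrop : s.toList.drop (pvBSplit s.toList) = s.toList.dropWhile PySem.Chars.isalpha := by
    rw [hsplit]; exact pv_drop_split _ _
  have hlen2 : ¬ (PySem.Str.len s < 2) := by
    have hsum : s.toList.length = (s.toList.takeWhile PySem.Chars.isalpha).length
        + (s.toList.dropWhile PySem.Chars.isalpha).length := by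
      rw [← List.length_append, List.takeWhile_append_dropWhile]
    have h1 : 1 ≤ (s.toList.takeWhile PySem.Chars.isalpha).length := List.length_pos_iff.2 hl
    have h2 : 1 ≤ (s.toList.dropWhile PySem.Chars.isalpha).length := List.length_pos_iff.2 hr
    rw [PySem.Str.len_eq]
    omega
  have hsd : PySem.Chars.strIsdigit (s.toList.dropWhile PySem.Chars.isalpha) = true := by
    simp only [PySem.Chars.strIsdigit, hd, Bool.and_true, Bool.not_eq_true', List.isEmpty_eq_false_iff]
    exact hr
  rw [if_neg hlen2, pvAClassify_spec s.toList hd, htake, hdrop]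
  dsimp only
  rw [if_neg (fun h => h.elim hl hr), if_neg (fun h => h.elim hl (fun h2 => h2 hsd))]
  rcases hn : PySem.Int.ofStr? (String.mk (s.toList.dropWhile PySem.Chars.isalpha)) with _ | n <;> dsimp only
  by_cases hrow : n - 1 < 0
  · rw [if_pos hrow, if_pos hrow]
  · rw [if_neg hrow, if_neg hrow, pv_horner _ 0]
    simp
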